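-- pv_equiv track=rewrite | github.com/dmchoull/cdeploy | cdeploy/cqlexecutor.py | migration_section_of
-- ===== SOURCE A (Python) =====
-- def migration_section_of(script):
--     migration_section = ''
--     for line in script.split('\n'):
--         if undo_marker(line):
--             break
--         elif commented(line):
--             continue
--         else:
--             migration_section += line + '\n'
--     return migration_section
--
-- def undo_marker(line):
--     return line.strip().startswith('--//@UNDO')
--
-- def commented(line):
--     return line.startswith('--') or line.startswith('//')
-- ===== SOURCE B (Python) =====
-- def migration_section_of(script):
--     out = []
--     buf = []
--     for ch in script:
--         if ch == '\n':
--             line = ''.join(buf)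
--             if undo_marker(line):
--                 return ''.join(out)
--             if not commented(line):
--                 out.append(line)
--                 out.append('\n')
--             buf = []
--         else:
--             buf.append(ch)
--     line = ''.join(buf)
--     if not undo_marker(line) and not commented(line):
--         out.append(line)
--         out.append('\n')
--     return ''.join(out)
--
--
-- def undo_marker(line):
--     return line.strip().startswith('--//@UNDO')
--
--
-- def commented(line):
--     return line.startswith('--') or line.startswith('//')
-- ===== Notes on version B (the rewrite author's own statement) =====
-- stated objective: alternative
-- what changed: Replaced the split-then-loop-over-lines accumulator by a single character-level state machine over the raw string: a line buffer flushed at each newline (and once at the end), never calling split.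
import Mathlib
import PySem

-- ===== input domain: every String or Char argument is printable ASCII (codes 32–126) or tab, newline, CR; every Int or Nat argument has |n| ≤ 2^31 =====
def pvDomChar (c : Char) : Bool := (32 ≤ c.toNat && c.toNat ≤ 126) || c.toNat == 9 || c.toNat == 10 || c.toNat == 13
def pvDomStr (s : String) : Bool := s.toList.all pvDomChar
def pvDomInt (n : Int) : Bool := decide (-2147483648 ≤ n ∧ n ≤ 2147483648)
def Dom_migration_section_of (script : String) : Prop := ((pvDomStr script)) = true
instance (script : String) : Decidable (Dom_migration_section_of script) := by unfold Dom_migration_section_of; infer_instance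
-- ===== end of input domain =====

-- B replaces A's split('\n')-then-loop accumulator by a single character-level state machine (line buffer flushed at each newline) over the raw string; equal output proved, same cost.


-- ===== PORT A =====
-- undo_marker(line)
def pvUndoMarker (line : String) : Bool :=
  PySem.Str.startswith (PySem.Str.strip line) "--//@UNDO"

-- commented(line)
def pvCommented (line : String) : Bool :=
  PySem.Str.startswith line "--" || PySem.Str.startswith line "//"

-- A's for-loop over script.split('\n') with break/continue and a string accumulator
def pvALoop : List String → String → String
  | [], acc => acc
  | l :: rest, acc =>
    if pvUndoMarker l then acc
    else if pvCommented l then pvALoop rest acc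
    else pvALoop rest (acc ++ l ++ "\n")

def migration_section_of (script : String) : String :=
  pvALoop ((PySem.Str.split? script "\n").getD []) ""

-- ===== PORT B =====
-- B's character state machine: out = emitted pieces, buf = current line buffer;
-- flush on '\n' (early return at the undo marker), final flush for the last line.
def pvBLoop : List Char → List Char → List String → List String
  | [], buf, out =>
    let line := String.ofList buf
    if !pvUndoMarker line && !pvCommented line then out ++ [line, "\n"] else out
  | c :: rest, buf, out =>
    if c = '\n' then
      let line := String.ofList buf
      if pvUndoMarker line then out
      else if pvCommented line then pvBLoop rest [] out
      else pvBLoop rest [] (out ++ [line, "\n"])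
    else pvBLoop rest (buf ++ [c]) out

def migration_section_of_alt (script : String) : String :=
  PySem.Str.join "" (pvBLoop script.toList [] [])

-- ===== PRECONDITION & SPEC =====
def Spec_migration_section_of (script : String) (out : String) : Prop := out = migration_section_of_alt script
instance (script : String) (out : String) : Decidable (Spec_migration_section_of script out) := by unfold Spec_migration_section_of; infer_instance

-- ===== CLAIM (what is proved, stated in full; the proofs are below) =====
def Claim_equal_migration_section_of : Prop := ∀ (script : String), Dom_migration_section_of script → Spec_migration_section_of script (migration_section_of script)

-- ===== LEMMAS AND PROOFS =====

-- char-level versions of the two helpers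
def pvUndoC (l : List Char) : Bool :=
  PySem.Chars.startswith (PySem.Chars.strip l) "--//@UNDO".toList
def pvCommC (l : List Char) : Bool :=
  PySem.Chars.startswith l "--".toList || PySem.Chars.startswith l "//".toList

lemma undo_bridge (s : String) : pvUndoMarker s = pvUndoC s.toList := by
  simp [pvUndoMarker, pvUndoC]

lemma comm_bridge (s : String) : pvCommented s = pvCommC s.toList := by
  simp [pvCommented, pvCommC]

-- the list of lines of cs under '\n' (split semantics: always at least one, possibly empty, piece)
def myLines : List Char → List (List Char)
  | [] => [[]]
  | c :: r =>
    if c = '\n' then [] :: myLines r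
    else
      match myLines r with
      | [] => [[c]]
      | h :: t => (c :: h) :: t

def consHead (p : List Char) : List (List Char) → List (List Char)
  | [] => [p]
  | h :: t => (p ++ h) :: t

lemma myLines_ne_nil (l : List Char) : myLines l ≠ [] := by
  cases l with
  | nil => simp [myLines]
  | cons c r =>
    simp only [myLines]
    split_ifs
    · simp
    · cases h : myLines r <;> simp

lemma consHead_consHead (p q : List Char) (xs : List (List Char)) :
    consHead p (consHead q xs) = consHead (p ++ q) xs := by
  cases xs <;> simp [consHead]

lemma myLines_cons_ne (c : Char) (r : List Char) (hc : c ≠ '\n') :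
    myLines (c :: r) = consHead [c] (myLines r) := by
  simp only [myLines, if_neg hc]
  cases h : myLines r <;> simp [consHead]

lemma consHead_nil_myLines (r : List Char) : consHead [] (myLines r) = myLines r := by
  cases h : myLines r with
  | nil => exact absurd h (myLines_ne_nil r)
  | cons a b => simp [consHead]

lemma go_nl (l : List Char) : ∀ (fuel : Nat) (cur : List Char) (acc : List (List Char)),
    l.length < fuel →
    PySem.Chars.splitOn.go ['\n'] fuel l cur acc = acc.reverse ++ consHead cur.reverse (myLines l) := by
  induction l with
  | nil =>
    intro fuel cur acc h
    cases fuel with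
    | zero => omega
    | succ f => rw [PySem.Chars.splitOn.go.eq_def]; simp [myLines, consHead]
  | cons c rest ih =>
    intro fuel cur acc h
    cases fuel with
    | zero => omega
    | succ f =>
      rw [PySem.Chars.splitOn.go.eq_def]
      by_cases hc : c = '\n'
      · subst hc
        simp only [List.isPrefixOf, List.length_cons] at *
        rw [if_pos (by simp)]
        rw [show List.drop (([] : List Char).length + 1) ('\n' :: rest) = rest from rfl]
        rw [ih f [] (cur.reverse :: acc) (by omega)]
        simp only [myLines, List.reverse_nil]
        rw [show consHead [] (myLines rest) = myLines rest from consHead_nil_myLines rest]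
        simp [consHead]
      · dsimp only
        rw [if_neg (by simp [List.isPrefixOf]; exact fun h => hc h.symm)]
        rw [ih f (c :: cur) acc (by simp at h ⊢; omega)]
        rw [myLines_cons_ne c rest hc, consHead_consHead]
        simp

lemma splitOn_nl (cs : List Char) : PySem.Chars.splitOn cs ['\n'] = myLines cs := by
  unfold PySem.Chars.splitOn
  rw [go_nl cs (cs.length + 1) [] [] (by omega)]
  cases h : myLines cs with
  | nil => exact absurd h (myLines_ne_nil cs)
  | cons a b => simp [consHead]

lemma split_lines (s : String) :
    (((PySem.Str.split? s "\n").getD []).map String.toList) = myLines s.toList := by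
  have h := PySem.Str.split?_map s "\n"
  cases hs : PySem.Str.split? s "\n" with
  | none =>
    rw [hs] at h
    simp [PySem.Chars.split?] at h
  | some L =>
    rw [hs] at h
    simp only [Option.map_some] at h
    have : "\n".toList = ['\n'] := by decide
    rw [this] at h
    simp only [PySem.Chars.split?] at h
    simp at h
    simp [h, splitOn_nl]

-- common denotation: what both loops emit for a given list of line chars
def pvProc : List (List Char) → List Char
  | [] => []
  | l :: rest =>
    if pvUndoC l then []
    else (if pvCommC l then [] else l ++ ['\n']) ++ pvProc rest

lemma pvALoop_toList (lines : List String) (acc : String) :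
    (pvALoop lines acc).toList = acc.toList ++ pvProc (lines.map String.toList) := by
  induction lines generalizing acc with
  | nil => simp [pvALoop, pvProc]
  | cons l rest ih =>
    by_cases hu : pvUndoMarker l
    · rw [undo_bridge] at hu
      simp [pvALoop, pvProc, undo_bridge, hu]
    · by_cases hc : pvCommented l
      · rw [undo_bridge] at hu; rw [comm_bridge] at hc
        simp [pvALoop, pvProc, undo_bridge, comm_bridge, hu, hc, ih]
      · rw [undo_bridge] at hu; rw [comm_bridge] at hc
        simp [pvALoop, pvProc, undo_bridge, comm_bridge, hu, hc, ih]

lemma mk_toList (l : List Char) : (String.ofList l).toList = l := by simp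

lemma undo_mk (l : List Char) : pvUndoMarker (String.ofList l) = pvUndoC l := by
  rw [undo_bridge, mk_toList]

lemma comm_mk (l : List Char) : pvCommented (String.ofList l) = pvCommC l := by
  rw [comm_bridge, mk_toList]

lemma pvBLoop_flat (cs : List Char) : ∀ (buf : List Char) (out : List String),
    ((pvBLoop cs buf out).map String.toList).flatten =
      (out.map String.toList).flatten ++ pvProc (consHead buf (myLines cs)) := by
  induction cs with
  | nil =>
    intro buf out
    by_cases hu : pvUndoC buf
    · simp [pvBLoop, myLines, consHead, pvProc, undo_mk, hu]
    · by_cases hc : pvCommC buf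
      · simp [pvBLoop, myLines, consHead, pvProc, undo_mk, comm_mk, hu, hc]
      · simp [pvBLoop, myLines, consHead, pvProc, undo_mk, comm_mk, hu, hc]
  | cons c rest ih =>
    intro buf out
    by_cases hnl : c = '\n'
    · subst hnl
      by_cases hu : pvUndoC buf
      · simp [pvBLoop, myLines, consHead, pvProc, undo_mk, hu]
      · by_cases hc : pvCommC buf
        · simp only [pvBLoop, undo_mk, comm_mk, hu, hc, Bool.false_eq_true,
            if_false, if_true]
          rw [ih [] out, consHead_nil_myLines]
          simp [myLines, consHead, pvProc, hu, hc]
        · simp only [pvBLoop, undo_mk, comm_mk, hu, hc, Bool.false_eq_true,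
            if_false, if_true]
          rw [ih [] (out ++ [String.ofList buf, "\n"]), consHead_nil_myLines]
          simp [myLines, consHead, pvProc, hu, hc]
    · simp only [pvBLoop, if_neg hnl]
      rw [ih (buf ++ [c]) out, myLines_cons_ne c rest hnl, consHead_consHead]

lemma join_empty (parts : List (List Char)) :
    PySem.Chars.join [] parts = parts.flatten := by
  induction parts with
  | nil => simp [PySem.Chars.join_nil]
  | cons a rest ih =>
    cases rest with
    | nil => simp [PySem.Chars.join_singleton]
    | cons b r =>
      rw [PySem.Chars.join_cons_cons]
      simp at ih ⊢
      simp [ih]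

-- ===== VERDICT (by name: the statement is the Claim_ definition above) =====
theorem migration_section_of_spec : Claim_equal_migration_section_of := by
  intro script _
  unfold Spec_migration_section_of
  apply String.toList_inj.mp
  rw [migration_section_of, pvALoop_toList, split_lines]
  rw [migration_section_of_alt, PySem.Str.toList_join]
  have : "".toList = ([] : List Char) := rfl
  rw [this, join_empty, pvBLoop_flat]
  cases hml : myLines script.toList with
  | nil => exact absurd hml (myLines_ne_nil script.toList)
  | cons a b => simp [consHead]
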